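-- pv_equiv track=rewrite | github.com/MiriamWisky/MIMIC | etl/src/etl/common.py | extract_dep_layers
-- ===== SOURCE A (Python) =====
-- def extract_dep_layers(deps, script):
--     dep_list = set(deps[script])
--     rval = set()
--     while dep_list:
--         dep_script = dep_list.pop()
--         if dep_script != script:
--             rval.add(dep_script)
--             to_add = set(deps.get(dep_script,[]))
--             dep_list.update(to_add.difference(rval))
--     return sorted(rval)
-- ===== SOURCE B (Python) =====
-- def extract_dep_layers(deps, script):
--     frontier = [d for d in deps[script] if d != script]
--     visited = set()
--     visited.update(frontier)
--     while frontier: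
--         frontier = [z for y in frontier
--                     for z in deps.get(y, [])
--                     if z != script and z not in visited]
--         visited.update(frontier)
--     return sorted(visited)
-- ===== Notes on version B (the rewrite author's own statement) =====
-- stated objective: alternative
-- what changed: Replaces A's one-element-at-a-time set worklist (pop, add, set-difference re-insertion) by a layered breadth-first search that expands a whole frontier list per round and batch-updates the visited set.
import Mathlib
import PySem

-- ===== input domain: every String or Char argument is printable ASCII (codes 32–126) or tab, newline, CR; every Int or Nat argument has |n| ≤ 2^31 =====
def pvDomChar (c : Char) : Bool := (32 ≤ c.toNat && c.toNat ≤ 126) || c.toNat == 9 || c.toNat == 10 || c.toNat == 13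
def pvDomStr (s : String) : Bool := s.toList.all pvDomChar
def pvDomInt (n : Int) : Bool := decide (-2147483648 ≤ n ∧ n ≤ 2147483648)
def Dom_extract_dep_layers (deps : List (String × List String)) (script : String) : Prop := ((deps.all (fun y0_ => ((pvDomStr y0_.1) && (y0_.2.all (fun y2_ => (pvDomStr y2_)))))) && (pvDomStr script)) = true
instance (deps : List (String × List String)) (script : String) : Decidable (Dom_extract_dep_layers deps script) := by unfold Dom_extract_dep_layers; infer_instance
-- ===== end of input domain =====

-- B replaces A's one-at-a-time set worklist with a layered breadth-first search over frontier lists (alternative decomposition; equal on all inputs where deps[script] exists).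


-- ===== PORT A =====
-- deps.get(x, []) — shared dictionary accessor
def pvGetDep (deps : List (String × List String)) (x : String) : List String :=
  PySem.Dict.getD (PySem.Dict.mk deps) x []

-- A's while-loop; fuel only makes the recursion total (proved sufficient below);
-- the set pop takes the head element: the returned sorted set is order-independent.
def pvLoopA (deps : List (String × List String)) (script : String) :
    Nat → PySem.Set String → PySem.Set String → List String
  | 0, _, rval => PySem.List.sorted rval (fun x => x) false
  | _ + 1, [], rval => PySem.List.sorted rval (fun x => x) false
  | fuel + 1, dep_script :: dep_list, rval =>
      if dep_script ≠ script then
        let rval' := PySem.Set.add rval dep_script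
        let to_add := PySem.Set.ofList (pvGetDep deps dep_script)
        pvLoopA deps script fuel
          (PySem.Set.update dep_list (PySem.Set.diff to_add rval')) rval'
      else pvLoopA deps script fuel dep_list rval

def pvFuelA (deps : List (String × List String)) : Nat :=
  ((deps.flatMap (fun p => p.2)).length + 2) * ((deps.flatMap (fun p => p.2)).length + 2)

def extract_dep_layers (deps : List (String × List String)) (script : String) : List String :=
  match PySem.Dict.get? (PySem.Dict.mk deps) script with
  | none => []   -- deps[script] raises KeyError: excluded by Pre_
  | some seed => pvLoopA deps script (pvFuelA deps) (PySem.Set.ofList seed) PySem.Set.empty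

-- ===== PORT B =====
-- B's while-loop: expand the whole frontier per round, batch-update visited.
def pvLoopB (deps : List (String × List String)) (script : String) :
    Nat → PySem.Set String → List String → List String
  | _, visited, [] => PySem.List.sorted visited (fun x => x) false
  | 0, visited, _ => PySem.List.sorted visited (fun x => x) false
  | fuel + 1, visited, f :: fs =>
      let frontier := (f :: fs).flatMap
        (fun y => (pvGetDep deps y).filter (fun z => decide (z ≠ script ∧ z ∉ visited)))
      pvLoopB deps script fuel (PySem.Set.update visited frontier) frontier

def pvFuelB (deps : List (String × List String)) : Nat :=
  (deps.flatMap (fun p => p.2)).length + 2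

def extract_dep_layers_alt (deps : List (String × List String)) (script : String) : List String :=
  match PySem.Dict.get? (PySem.Dict.mk deps) script with
  | none => []   -- deps[script] raises KeyError: excluded by Pre_
  | some seed =>
      let frontier := seed.filter (fun d => decide (d ≠ script))
      pvLoopB deps script (pvFuelB deps) (PySem.Set.update PySem.Set.empty frontier) frontier

-- ===== PRECONDITION & SPEC =====
-- Pre_ excludes exactly the inputs where deps[script] raises KeyError (script not a key).
def Pre_extract_dep_layers (deps : List (String × List String)) (script : String) : Prop :=
  script ∈ deps.map Prod.fst

instance (deps : List (String × List String)) (script : String) : Decidable (Pre_extract_dep_layers deps script) := by unfold Pre_extract_dep_layers; infer_instance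

def pvWitness_extract_dep_layers : (List (String × List String)) × String :=
  ([("a", ["b", "c"]), ("b", ["c"]), ("c", [])], "a")

def Spec_extract_dep_layers (deps : List (String × List String)) (script : String) (out : List String) : Prop := out = extract_dep_layers_alt deps script
instance (deps : List (String × List String)) (script : String) (out : List String) : Decidable (Spec_extract_dep_layers deps script out) := by unfold Spec_extract_dep_layers; infer_instance

-- ===== CLAIM (what is proved, stated in full; the proofs are below) =====
def Claim_equal_extract_dep_layers : Prop := ∀ (deps : List (String × List String)) (script : String), Dom_extract_dep_layers deps script → Pre_extract_dep_layers deps script → Spec_extract_dep_layers deps script (extract_dep_layers deps script)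

-- ===== LEMMAS AND PROOFS =====

-- the set of strings reachable from the seed (deps[script]) along dep edges, never passing through script
inductive pvReach (deps : List (String × List String)) (script : String) (seed : List String) : String → Prop
  | base {x} : x ∈ seed → x ≠ script → pvReach deps script seed x
  | step {x y} : pvReach deps script seed y → x ∈ pvGetDep deps y → x ≠ script →
      pvReach deps script seed x

-- the finite universe of candidate nodes
def pvU (deps : List (String × List String)) : List String := deps.flatMap (fun p => p.2)

theorem pvGetDep_sub (deps : List (String × List String)) (x : String) :
    ∀ y ∈ pvGetDep deps x, y ∈ pvU deps := by
  induction deps with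
  | nil => intro y hy; simp [pvGetDep, PySem.Dict.getD, PySem.Dict.get?] at hy
  | cons p rest ih =>
    intro y hy
    rcases p with ⟨k, v⟩
    simp only [pvGetDep, PySem.Dict.getD] at hy
    rw [PySem.Dict.get?_mk_cons] at hy
    simp only [pvU, List.flatMap_cons, List.mem_append]
    by_cases h : (k == x) = true
    · left; simp only [h, if_pos] at hy; simpa using hy
    · right
      simp only [h, if_neg, Bool.false_eq_true, not_false_iff] at hy
      exact ih y (by simpa [pvGetDep, PySem.Dict.getD] using hy)

theorem pvSeed_sub (deps : List (String × List String)) (script : String) (seed : List String)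
    (h : PySem.Dict.get? (PySem.Dict.mk deps) script = some seed) :
    ∀ y ∈ seed, y ∈ pvU deps := by
  induction deps with
  | nil => simp [PySem.Dict.get?] at h
  | cons p rest ih =>
    rcases p with ⟨k, v⟩
    rw [PySem.Dict.get?_mk_cons] at h
    intro y hy
    simp only [pvU, List.flatMap_cons, List.mem_append]
    by_cases hc : (k == script) = true
    · left; simp only [hc, if_pos, Option.some.injEq] at h; subst h; simpa using hy
    · right
      simp only [hc, if_neg, Bool.false_eq_true, not_false_iff] at h
      exact ih h y hy

theorem pvNodupLen {l U : List String} (hn : l.Nodup) (hs : ∀ x ∈ l, x ∈ U) :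
    l.length ≤ U.length := by
  calc l.length = l.toFinset.card := (List.toFinset_card_of_nodup hn).symm
    _ ≤ U.toFinset.card := by
        apply Finset.card_le_card
        intro a ha
        rw [List.mem_toFinset] at ha ⊢
        exact hs a ha
    _ ≤ U.length := List.toFinset_card_le U

theorem pvLenUpdate (xs s : List String) :
    (PySem.Set.update s xs).length ≤ s.length + xs.length := by
  induction xs generalizing s with
  | nil => simp [PySem.Set.update]
  | cons x xs ih =>
    rw [PySem.Set.update_cons]
    have h1 : (PySem.Set.add s x).length ≤ s.length + 1 := by
      rw [PySem.Set.add_eq_ite]; split <;> simp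
    calc (PySem.Set.update (PySem.Set.add s x) xs).length
        ≤ (PySem.Set.add s x).length + xs.length := ih _
      _ ≤ s.length + (x :: xs).length := by simp only [List.length_cons]; omega

-- a visited set that is sound, closed and covers the seed is exactly the reach set
theorem pvClosedReach (deps : List (String × List String)) (script : String) (seed : List String)
    (v : List String)
    (hsound : ∀ x ∈ v, pvReach deps script seed x)
    (hclos : ∀ y ∈ v, ∀ z ∈ pvGetDep deps y, z ≠ script → z ∈ v)
    (hcov : ∀ x ∈ seed, x ≠ script → x ∈ v) :
    ∀ x, x ∈ v ↔ pvReach deps script seed x := by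
  intro x
  constructor
  · exact hsound x
  · intro hr
    induction hr with
    | base h1 h2 => exact hcov _ h1 h2
    | step hy hz hzs ihy => exact hclos _ ihy _ hz hzs

-- A-side loop invariant: on termination rval is exactly the reach set
theorem pvLoopA_spec (deps : List (String × List String)) (script : String) (seed : List String) :
    ∀ (fuel : Nat) (dl rv : PySem.Set String),
      ((pvU deps).toFinset \ rv.toFinset).card * ((pvU deps).length + 2) + dl.length < fuel →
      dl.Nodup → rv.Nodup →
      (∀ x ∈ dl, x ∈ pvU deps) → (∀ x ∈ rv, x ∈ pvU deps) →
      (∀ x ∈ rv, pvReach deps script seed x) →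
      (∀ x ∈ dl, x = script ∨ pvReach deps script seed x) →
      (∀ x ∈ seed, x = script ∨ x ∈ rv ∨ x ∈ dl) →
      (∀ y ∈ rv, ∀ z ∈ pvGetDep deps y, z = script ∨ z ∈ rv ∨ z ∈ dl) →
      (∀ x ∈ dl, x ∉ rv) → script ∉ rv →
      ∃ rv', pvLoopA deps script fuel dl rv = PySem.List.sorted rv' (fun x => x) false ∧
        rv'.Nodup ∧ (∀ x, x ∈ rv' ↔ pvReach deps script seed x) := by
  intro fuel
  induction fuel with
  | zero => intro dl rv hm; exact absurd hm (Nat.not_lt_zero _)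
  | succ f ih =>
    intro dl rv hm hndl hnrv hdlU hrvU hrvR hdlR hseed hclos hdisj hscript
    match dl with
    | [] =>
      refine ⟨rv, rfl, hnrv, pvClosedReach deps script seed rv hrvR ?_ ?_⟩
      · intro y hy z hz hzs
        rcases hclos y hy z hz with h | h | h
        · exact absurd h hzs
        · exact h
        · exact absurd h (List.not_mem_nil)
      · intro x hx hxs
        rcases hseed x hx with h | h | h
        · exact absurd h hxs
        · exact h
        · exact absurd h (List.not_mem_nil)
    | x :: rest =>
      have hrest_nodup : rest.Nodup := (List.nodup_cons.mp hndl).2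
      have hx_notin_rest : x ∉ rest := (List.nodup_cons.mp hndl).1
      by_cases hx : x = script
      · -- popped element is script: skip it
        have heq : pvLoopA deps script (f + 1) (x :: rest) rv = pvLoopA deps script f rest rv := by
          simp [pvLoopA, hx]
        rw [heq]
        apply ih rest rv
        · simp only [List.length_cons] at hm; omega
        · exact hrest_nodup
        · exact hnrv
        · exact fun a ha => hdlU a (List.mem_cons_of_mem _ ha)
        · exact hrvU
        · exact hrvR
        · exact fun a ha => hdlR a (List.mem_cons_of_mem _ ha)
        · intro a ha
          rcases hseed a ha with h | h | h
          · exact Or.inl h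
          · exact Or.inr (Or.inl h)
          · rcases List.mem_cons.mp h with rfl | h'
            · exact Or.inl hx
            · exact Or.inr (Or.inr h')
        · intro y hy z hz
          rcases hclos y hy z hz with h | h | h
          · exact Or.inl h
          · exact Or.inr (Or.inl h)
          · rcases List.mem_cons.mp h with rfl | h'
            · exact Or.inl hx
            · exact Or.inr (Or.inr h')
        · exact fun a ha => hdisj a (List.mem_cons_of_mem _ ha)
        · exact hscript
      · -- popped element enters rval and its fresh neighbours enter the worklist
        have hxrv : x ∉ rv := hdisj x List.mem_cons_self
        have hxU : x ∈ pvU deps := hdlU x List.mem_cons_self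
        have hreachx : pvReach deps script seed x := (hdlR x List.mem_cons_self).resolve_left hx
        set rv' := PySem.Set.add rv x with hrv'
        set dl' := PySem.Set.update rest
          (PySem.Set.diff (PySem.Set.ofList (pvGetDep deps x)) rv') with hdl'
        have heq : pvLoopA deps script (f + 1) (x :: rest) rv = pvLoopA deps script f dl' rv' := by
          simp [pvLoopA, hx, hrv', hdl']
        rw [heq]
        have hmem_rv' : ∀ a, a ∈ rv' ↔ a ∈ rv ∨ a = x := fun a => PySem.Set.mem_add rv x a
        have hmem_dl' : ∀ a, a ∈ dl' ↔ a ∈ rest ∨ (a ∈ pvGetDep deps x ∧ a ∉ rv') := by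
          intro a
          rw [hdl', PySem.Set.mem_update]
          constructor
          · rintro (h | h)
            · exact Or.inl h
            · rw [PySem.Set.mem_diff] at h
              exact Or.inr ⟨(PySem.Set.mem_ofList _ _).mp h.1, h.2⟩
          · rintro (h | ⟨h1, h2⟩)
            · exact Or.inl h
            · exact Or.inr ((PySem.Set.mem_diff _ _ _).mpr ⟨(PySem.Set.mem_ofList _ _).mpr h1, h2⟩)
        apply ih dl' rv'
        · -- measure decreases
          have hrva : rv' = rv ++ [x] := PySem.Set.add_of_not_mem hxrv
          have hfin : rv'.toFinset = insert x rv.toFinset := by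
            rw [hrva]; simp [List.toFinset_append]
          have hxmem : x ∈ (pvU deps).toFinset \ rv.toFinset := by
            rw [Finset.mem_sdiff, List.mem_toFinset, List.mem_toFinset]; exact ⟨hxU, hxrv⟩
          have hsd : (pvU deps).toFinset \ rv'.toFinset
              = ((pvU deps).toFinset \ rv.toFinset).erase x := by
            rw [hfin]; ext a
            simp only [Finset.mem_sdiff, Finset.mem_erase, Finset.mem_insert]
            tauto
          have hcard : ((pvU deps).toFinset \ rv.toFinset).card
              = ((pvU deps).toFinset \ rv'.toFinset).card + 1 := by
            rw [hsd, Finset.card_erase_of_mem hxmem]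
            have hpos : 0 < ((pvU deps).toFinset \ rv.toFinset).card :=
              Finset.card_pos.mpr ⟨x, hxmem⟩
            omega
          have hdlen : dl'.length ≤ rest.length + (pvU deps).length := by
            have h1 := pvLenUpdate (PySem.Set.diff (PySem.Set.ofList (pvGetDep deps x)) rv') rest
            have h2 : (PySem.Set.diff (PySem.Set.ofList (pvGetDep deps x)) rv').length
                ≤ (pvU deps).length := by
              apply pvNodupLen (PySem.Set.nodup_diff _ _ (PySem.Set.nodup_ofList _))
              intro a ha
              rw [PySem.Set.mem_diff] at ha
              exact pvGetDep_sub deps x a ((PySem.Set.mem_ofList _ _).mp ha.1)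
            rw [hdl']; omega
          rw [hcard] at hm
          have hexp : (((pvU deps).toFinset \ rv'.toFinset).card + 1) * ((pvU deps).length + 2)
              = ((pvU deps).toFinset \ rv'.toFinset).card * ((pvU deps).length + 2)
                + ((pvU deps).length + 2) := by ring
          rw [hexp] at hm
          simp only [List.length_cons] at hm
          generalize ((pvU deps).toFinset \ rv'.toFinset).card * ((pvU deps).length + 2) = t at hm ⊢
          omega
        · exact PySem.Set.nodup_update _ _ hrest_nodup
        · exact PySem.Set.nodup_add _ _ hnrv
        · intro a ha
          rcases (hmem_dl' a).mp ha with h | ⟨h1, _⟩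
          · exact hdlU a (List.mem_cons_of_mem _ h)
          · exact pvGetDep_sub deps x a h1
        · intro a ha
          rcases (hmem_rv' a).mp ha with h | rfl
          · exact hrvU a h
          · exact hxU
        · intro a ha
          rcases (hmem_rv' a).mp ha with h | rfl
          · exact hrvR a h
          · exact hreachx
        · intro a ha
          rcases (hmem_dl' a).mp ha with h | ⟨h1, _⟩
          · exact hdlR a (List.mem_cons_of_mem _ h)
          · by_cases has : a = script
            · exact Or.inl has
            · exact Or.inr (pvReach.step hreachx h1 has)
        · intro a ha
          rcases hseed a ha with h | h | h
          · exact Or.inl h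
          · exact Or.inr (Or.inl ((hmem_rv' a).mpr (Or.inl h)))
          · rcases List.mem_cons.mp h with rfl | h'
            · exact Or.inr (Or.inl ((hmem_rv' a).mpr (Or.inr rfl)))
            · exact Or.inr (Or.inr ((hmem_dl' a).mpr (Or.inl h')))
        · intro y hy z hz
          rcases (hmem_rv' y).mp hy with hyrv | rfl
          · rcases hclos y hyrv z hz with h | h | h
            · exact Or.inl h
            · exact Or.inr (Or.inl ((hmem_rv' z).mpr (Or.inl h)))
            · rcases List.mem_cons.mp h with rfl | h'
              · exact Or.inr (Or.inl ((hmem_rv' z).mpr (Or.inr rfl)))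
              · exact Or.inr (Or.inr ((hmem_dl' z).mpr (Or.inl h')))
          · by_cases hzs : z = script
            · exact Or.inl hzs
            · by_cases hzrv : z ∈ rv'
              · exact Or.inr (Or.inl hzrv)
              · exact Or.inr (Or.inr ((hmem_dl' z).mpr (Or.inr ⟨hz, hzrv⟩)))
        · intro a ha
          rcases (hmem_dl' a).mp ha with h | ⟨_, h2⟩
          · intro hmem
            rcases (hmem_rv' a).mp hmem with h' | rfl
            · exact hdisj a (List.mem_cons_of_mem _ h) h'
            · exact hx_notin_rest h
          · exact h2
        · intro hmem
          rcases (hmem_rv' script).mp hmem with h | h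
          · exact hscript h
          · exact hx h.symm

-- B-side loop invariant
theorem pvLoopB_spec (deps : List (String × List String)) (script : String) (seed : List String) :
    ∀ (fuel : Nat) (visited : PySem.Set String) (frontier : List String),
      (frontier ≠ [] → ((pvU deps).toFinset \ visited.toFinset).card + 2 ≤ fuel) →
      visited.Nodup → (∀ x ∈ visited, x ∈ pvU deps) → script ∉ visited →
      (∀ x ∈ frontier, x ≠ script ∧ x ∈ visited) →
      (∀ x ∈ visited, pvReach deps script seed x) →
      (∀ y ∈ visited, y ∈ frontier ∨ (∀ z ∈ pvGetDep deps y, z ≠ script → z ∈ visited)) →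
      (∀ x ∈ seed, x ≠ script → x ∈ visited) →
      ∃ v', pvLoopB deps script fuel visited frontier = PySem.List.sorted v' (fun x => x) false ∧
        v'.Nodup ∧ (∀ x, x ∈ v' ↔ pvReach deps script seed x) := by
  intro fuel
  induction fuel with
  | zero =>
    intro visited frontier hfuel hn hU hs hfr hR hclos hcov
    match frontier with
    | [] =>
      refine ⟨visited, rfl, hn, pvClosedReach deps script seed visited hR ?_ hcov⟩
      intro y hy z hz hzs
      rcases hclos y hy with h | h
      · exact absurd h (List.not_mem_nil)
      · exact h z hz hzs
    | f :: fs => exact absurd (hfuel (List.cons_ne_nil f fs)) (by omega)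
  | succ n ih =>
    intro visited frontier hfuel hn hU hs hfr hR hclos hcov
    match frontier with
    | [] =>
      refine ⟨visited, rfl, hn, pvClosedReach deps script seed visited hR ?_ hcov⟩
      intro y hy z hz hzs
      rcases hclos y hy with h | h
      · exact absurd h (List.not_mem_nil)
      · exact h z hz hzs
    | f :: fs =>
      set F := (f :: fs).flatMap
        (fun y => (pvGetDep deps y).filter (fun z => decide (z ≠ script ∧ z ∉ visited))) with hF
      have heq : pvLoopB deps script (n + 1) visited (f :: fs)
          = pvLoopB deps script n (PySem.Set.update visited F) F := by
        simp [pvLoopB, hF]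
      rw [heq]
      have hmemF : ∀ a, a ∈ F ↔ ∃ y ∈ f :: fs, a ∈ pvGetDep deps y ∧ a ≠ script ∧ a ∉ visited := by
        intro a
        rw [hF, List.mem_flatMap]
        constructor
        · rintro ⟨y, hy, ha⟩
          rw [List.mem_filter] at ha
          refine ⟨y, hy, ha.1, ?_⟩
          have := ha.2; simp only [decide_eq_true_eq] at this; exact this
        · rintro ⟨y, hy, h1, h2, h3⟩
          exact ⟨y, hy, List.mem_filter.mpr ⟨h1, by simp [h2, h3]⟩⟩
      have hmemV : ∀ a, a ∈ PySem.Set.update visited F ↔ a ∈ visited ∨ a ∈ F :=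
        fun a => PySem.Set.mem_update visited F a
      apply ih
      · -- fuel bound for the next round
        intro hFne
        have hcards := hfuel (List.cons_ne_nil f fs)
        obtain ⟨z, hz⟩ : ∃ z, z ∈ F := List.exists_mem_of_ne_nil F hFne
        obtain ⟨y, _, hzy, hzs, hzv⟩ := (hmemF z).mp hz
        have hzU : z ∈ pvU deps := pvGetDep_sub deps y z hzy
        have hzmem : z ∈ (pvU deps).toFinset \ visited.toFinset := by
          rw [Finset.mem_sdiff, List.mem_toFinset, List.mem_toFinset]; exact ⟨hzU, hzv⟩
        have hsub : (pvU deps).toFinset \ (PySem.Set.update visited F).toFinset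
            ⊆ ((pvU deps).toFinset \ visited.toFinset).erase z := by
          intro a ha
          rw [Finset.mem_sdiff, List.mem_toFinset, List.mem_toFinset] at ha
          rw [Finset.mem_erase, Finset.mem_sdiff, List.mem_toFinset, List.mem_toFinset]
          refine ⟨?_, ha.1, fun hav => ha.2 ((hmemV a).mpr (Or.inl hav))⟩
          rintro rfl
          exact ha.2 ((hmemV a).mpr (Or.inr hz))
        have h1 := Finset.card_le_card hsub
        rw [Finset.card_erase_of_mem hzmem] at h1
        have hpos : 0 < ((pvU deps).toFinset \ visited.toFinset).card :=
          Finset.card_pos.mpr ⟨z, hzmem⟩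
        omega
      · exact PySem.Set.nodup_update _ _ hn
      · intro a ha
        rcases (hmemV a).mp ha with h | h
        · exact hU a h
        · obtain ⟨y, _, h1, _, _⟩ := (hmemF a).mp h
          exact pvGetDep_sub deps y a h1
      · intro hmem
        rcases (hmemV script).mp hmem with h | h
        · exact hs h
        · obtain ⟨y, _, _, h2, _⟩ := (hmemF script).mp h
          exact h2 rfl
      · intro a ha
        obtain ⟨y, _, _, h2, _⟩ := (hmemF a).mp ha
        exact ⟨h2, (hmemV a).mpr (Or.inr ha)⟩
      · intro a ha
        rcases (hmemV a).mp ha with h | h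
        · exact hR a h
        · obtain ⟨y, hy, h1, h2, _⟩ := (hmemF a).mp h
          exact pvReach.step (hR y (hfr y hy).2) h1 h2
      · intro y hy
        rcases (hmemV y).mp hy with hyv | hyF
        · rcases hclos y hyv with hfr' | hcl
          · -- y was in the old frontier: it has just been fully expanded
            right
            intro z hz hzs
            by_cases hzv : z ∈ visited
            · exact (hmemV z).mpr (Or.inl hzv)
            · exact (hmemV z).mpr (Or.inr ((hmemF z).mpr ⟨y, hfr', hz, hzs, hzv⟩))
          · right
            intro z hz hzs
            exact (hmemV z).mpr (Or.inl (hcl z hz hzs))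
        · exact Or.inl hyF
      · intro a ha has
        exact (hmemV a).mpr (Or.inl (hcov a ha has))

-- ===== VERDICT (by name: the statement is the Claim_ definition above) =====
theorem extract_dep_layers_spec : Claim_equal_extract_dep_layers := by
  intro deps script _ hpre
  unfold Spec_extract_dep_layers
  have hkey : ∃ seed, PySem.Dict.get? (PySem.Dict.mk deps) script = some seed := by
    rcases hcase : PySem.Dict.get? (PySem.Dict.mk deps) script with _ | seed
    · exfalso
      rw [PySem.Dict.get?_eq_none_iff_not_mem_keys] at hcase
      rw [PySem.Dict.keys_mk] at hcase
      exact hcase hpre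
    · exact ⟨seed, rfl⟩
  obtain ⟨seed, hseed⟩ := hkey
  unfold extract_dep_layers extract_dep_layers_alt
  rw [hseed]
  simp only
  have hL2 : ((pvU deps).length + 2) * ((pvU deps).length + 2)
      = (pvU deps).length * ((pvU deps).length + 2) + 2 * (pvU deps).length + 4 := by ring
  have hseedU : ∀ y ∈ seed, y ∈ pvU deps := pvSeed_sub deps script seed hseed
  -- A side
  obtain ⟨rvA, hA, hAn, hAmem⟩ :=
    pvLoopA_spec deps script seed (pvFuelA deps) (PySem.Set.ofList seed) PySem.Set.empty
      (by
        have hc : ((pvU deps).toFinset \ (PySem.Set.empty : PySem.Set String).toFinset).card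
            ≤ (pvU deps).length := by
          calc ((pvU deps).toFinset \ (PySem.Set.empty : PySem.Set String).toFinset).card
              ≤ (pvU deps).toFinset.card := Finset.card_le_card (Finset.sdiff_subset)
            _ ≤ (pvU deps).length := List.toFinset_card_le _
        have hsl : (PySem.Set.ofList seed).length ≤ (pvU deps).length :=
          pvNodupLen (PySem.Set.nodup_ofList seed)
            (fun a ha => hseedU a ((PySem.Set.mem_ofList seed a).mp ha))
        have hmul := Nat.mul_le_mul_right ((pvU deps).length + 2) hc
        unfold pvFuelA
        show _ < ((pvU deps).length + 2) * ((pvU deps).length + 2)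
        rw [hL2]
        generalize hg1 : ((pvU deps).toFinset \ (PySem.Set.empty : PySem.Set String).toFinset).card
          * ((pvU deps).length + 2) = t1 at hmul ⊢
        generalize hg2 : (pvU deps).length * ((pvU deps).length + 2) = t2 at hmul ⊢
        omega)
      (PySem.Set.nodup_ofList seed) (List.nodup_nil)
      (fun a ha => hseedU a ((PySem.Set.mem_ofList seed a).mp ha))
      (fun a ha => absurd ha (List.not_mem_nil))
      (fun a ha => absurd ha (List.not_mem_nil))
      (by
        intro a ha
        have ha' := (PySem.Set.mem_ofList seed a).mp ha
        by_cases has : a = script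
        · exact Or.inl has
        · exact Or.inr (pvReach.base ha' has))
      (fun a ha => Or.inr (Or.inr ((PySem.Set.mem_ofList seed a).mpr ha)))
      (fun y hy => absurd hy (List.not_mem_nil))
      (fun a _ h => absurd h (List.not_mem_nil))
      (fun h => absurd h (List.not_mem_nil))
  -- B side
  have hupd : PySem.Set.update PySem.Set.empty (seed.filter (fun d => decide (d ≠ script)))
      = PySem.Set.ofList (seed.filter (fun d => decide (d ≠ script))) :=
    PySem.Set.update_nil_left _
  have hmemV0 : ∀ a, a ∈ PySem.Set.update PySem.Set.empty
      (seed.filter (fun d => decide (d ≠ script))) ↔ a ∈ seed ∧ a ≠ script := by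
    intro a
    rw [hupd, PySem.Set.mem_ofList, List.mem_filter]
    simp
  obtain ⟨vB, hB, hBn, hBmem⟩ :=
    pvLoopB_spec deps script seed (pvFuelB deps)
      (PySem.Set.update PySem.Set.empty (seed.filter (fun d => decide (d ≠ script))))
      (seed.filter (fun d => decide (d ≠ script)))
      (by
        intro _
        unfold pvFuelB
        show ((pvU deps).toFinset \ _).card + 2 ≤ (pvU deps).length + 2
        have hc : ((pvU deps).toFinset \ (PySem.Set.update PySem.Set.empty
            (seed.filter (fun d => decide (d ≠ script)))).toFinset).card ≤ (pvU deps).length := by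
          calc _ ≤ (pvU deps).toFinset.card := Finset.card_le_card (Finset.sdiff_subset)
            _ ≤ (pvU deps).length := List.toFinset_card_le _
        omega)
      (by rw [hupd]; exact PySem.Set.nodup_ofList _)
      (fun a ha => hseedU a ((hmemV0 a).mp ha).1)
      (fun h => ((hmemV0 script).mp h).2 rfl)
      (by
        intro a ha
        rw [List.mem_filter] at ha
        have h2 : a ≠ script := by have := ha.2; simpa using this
        exact ⟨h2, (hmemV0 a).mpr ⟨ha.1, h2⟩⟩)
      (fun a ha => pvReach.base ((hmemV0 a).mp ha).1 ((hmemV0 a).mp ha).2)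
      (by
        intro y hy
        left
        rw [List.mem_filter]
        have h := (hmemV0 y).mp hy
        exact ⟨h.1, by simp [h.2]⟩)
      (fun a ha has => (hmemV0 a).mpr ⟨ha, has⟩)
  rw [hA, hB]
  apply PySem.List.sorted_eq_sorted_of_perm rvA vB (fun x => x) (fun a b h => h)
  rw [List.perm_ext_iff_of_nodup hAn hBn]
  intro a
  rw [hAmem a, hBmem a]
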